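-- pv_equiv track=rewrite | github.com/francis-clairicia/CPE_matchstick_2019 | bonus/matchstick.py | find_largest_unbalanced
-- ===== SOURCE A (Python) =====
-- def find_largest_unbalanced(balance):
--     mask = 1
--     largest = 1
--     while mask <= balance:
--         if (balance & mask) != 0:
--             largest = mask
--         mask = mask << 1
--     return largest
-- ===== SOURCE B (Python) =====
-- def find_largest_unbalanced(balance):
--     if balance < 1:
--         return 1
--     return 1 << (balance.bit_length() - 1)
-- ===== Notes on version B (the rewrite author's own statement) =====
-- stated objective: idiomatic
-- what changed: Replaces the bit-by-bit while loop maintaining mask/largest with a closed-form expression: 1 << (balance.bit_length() - 1) for positive balance, 1 otherwise.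
import Mathlib
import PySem

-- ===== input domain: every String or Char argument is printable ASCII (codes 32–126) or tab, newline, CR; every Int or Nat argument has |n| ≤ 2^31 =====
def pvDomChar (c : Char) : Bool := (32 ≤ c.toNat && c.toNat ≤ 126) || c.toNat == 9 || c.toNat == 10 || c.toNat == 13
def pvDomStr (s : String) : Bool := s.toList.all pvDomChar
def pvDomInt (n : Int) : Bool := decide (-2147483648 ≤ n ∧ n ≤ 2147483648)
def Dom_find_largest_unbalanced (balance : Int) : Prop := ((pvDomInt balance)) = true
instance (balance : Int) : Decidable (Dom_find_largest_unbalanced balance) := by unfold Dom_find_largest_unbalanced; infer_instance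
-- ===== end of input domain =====

-- B replaces A's bit-scanning while loop by the closed form 1 <<< (bit_length - 1) (= 2^log2) for positive balance, 1 otherwise.


-- ===== PORT A =====
-- the while loop; the '1 ≤ mask' conjunct is a totality guard only (mask starts at 1 and doubles,
-- so it always holds on reachable states); 'mask << 1' is transliterated as 'mask * 2' (exact for Python ints)
-- 'balance & mask' is transliterated as Int.land (this toolchain has no AndOp ℤ instance; exact for Python ints)
def loopA (balance mask largest : Int) : Int :=
  if h : 1 ≤ mask ∧ mask ≤ balance then
    loopA balance (mask * 2) (if Int.land balance mask ≠ 0 then mask else largest)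
  else largest
termination_by (balance + 1 - mask).toNat
decreasing_by omega

def find_largest_unbalanced (balance : Int) : Int := loopA balance 1 1

-- ===== PORT B =====
def find_largest_unbalanced_alt (balance : Int) : Int :=
  if balance < 1 then 1
  else 1 <<< (balance.toNat.log2 + 1 - 1)  -- bit_length of a positive int = Nat.log2 + 1

-- ===== PRECONDITION & SPEC =====
def Spec_find_largest_unbalanced (balance : Int) (out : Int) : Prop := out = find_largest_unbalanced_alt balance
instance (balance : Int) (out : Int) : Decidable (Spec_find_largest_unbalanced balance out) := by unfold Spec_find_largest_unbalanced; infer_instance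

-- ===== CLAIM (what is proved, stated in full; the proofs are below) =====
def Claim_equal_find_largest_unbalanced : Prop := ∀ (balance : Int), Dom_find_largest_unbalanced balance → Spec_find_largest_unbalanced balance (find_largest_unbalanced balance)

-- ===== LEMMAS AND PROOFS =====

theorem testBit_of_bounds {m k : Nat} (h1 : 2 ^ k ≤ m) (h2 : m < 2 ^ (k + 1)) :
    m.testBit k = true := by
  have hd : m / 2 ^ k = 1 := Nat.div_eq_of_lt_le (by omega) (by rw [pow_succ] at h2; omega)
  simp [Nat.testBit, Nat.shiftRight_eq_div_pow, hd]

theorem loopA_pow {m : Nat} (hm : 1 ≤ m) :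
    ∀ j k l, m.log2 - k = j → 2 ^ k ≤ m → loopA (m : Int) ((2 ^ k : Nat) : Int) l = ((2 ^ m.log2 : Nat) : Int) := by
  intro j
  induction j with
  | zero =>
    intro k l hj hk
    have hk' : k ≤ m.log2 := (Nat.le_log2 (by omega)).2 hk
    have hke : k = m.log2 := by omega
    have hlt : m < 2 ^ (k + 1) := (Nat.log2_lt (by omega)).mp (by omega)
    have hbit : m.testBit k = true := testBit_of_bounds hk hlt
    rw [loopA.eq_def]
    have hcond : (1 : Int) ≤ ((2 ^ k : Nat) : Int) ∧ ((2 ^ k : Nat) : Int) ≤ (m : Int) := by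
      constructor
      · exact_mod_cast Nat.one_le_two_pow
      · exact_mod_cast hk
    rw [dif_pos hcond]
    have hand : Int.land (m : Int) ((2 ^ k : Nat) : Int) = ((m &&& 2 ^ k : Nat) : Int) := by
      simp [Int.land]
    have handv : m &&& 2 ^ k = 2 ^ k := by
      rw [Nat.and_two_pow, hbit]; simp
    rw [if_pos (by rw [hand, handv]; exact_mod_cast (by positivity : (0:Int) < ((2^k : Nat) : Int)).ne')]
    rw [loopA.eq_def]
    rw [dif_neg]
    · rw [hke]
    · push Not
      intro _
      have : ((2 ^ k : Nat) : Int) * 2 = ((2 ^ (k + 1) : Nat) : Int) := by push_cast; ring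
      rw [this]
      exact_mod_cast hlt
  | succ j ih =>
    intro k l hj hk
    have hk1 : 2 ^ (k + 1) ≤ m := by
      by_contra hlt
      push Not at hlt
      have : m.log2 < k + 1 := (Nat.log2_lt (by omega)).mpr hlt
      omega
    rw [loopA.eq_def]
    have hcond : (1 : Int) ≤ ((2 ^ k : Nat) : Int) ∧ ((2 ^ k : Nat) : Int) ≤ (m : Int) := by
      constructor
      · exact_mod_cast Nat.one_le_two_pow
      · exact_mod_cast hk
    rw [dif_pos hcond]
    have hmul : ((2 ^ k : Nat) : Int) * 2 = ((2 ^ (k + 1) : Nat) : Int) := by push_cast; ring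
    rw [hmul]
    exact ih (k + 1) _ (by omega) hk1

-- ===== VERDICT (by name: the statement is the Claim_ definition above) =====
theorem find_largest_unbalanced_spec : Claim_equal_find_largest_unbalanced := by
  intro balance _
  unfold Spec_find_largest_unbalanced find_largest_unbalanced find_largest_unbalanced_alt
  by_cases hb : balance < 1
  · rw [loopA.eq_def, dif_neg (by omega), if_pos hb]
  · push Not at hb
    rw [if_neg (by omega)]
    obtain ⟨m, rfl⟩ : ∃ m : Nat, balance = (m : Int) := ⟨balance.toNat, by omega⟩
    have hm : 1 ≤ m := by exact_mod_cast hb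
    have h := loopA_pow hm (m.log2 - 0) 0 1 rfl (by simpa using hm)
    simp only [pow_zero, Nat.cast_one] at h
    rw [h]
    simp [Nat.shiftLeft_eq, Int.toNat_natCast]
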